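-- pv_equiv track=rewrite | github.com/ULT1M4T3CK/Nijenhuis | boat_translations.py | translate_boat_names
-- ===== SOURCE A (Python) =====
-- BOAT_TRANSLATIONS = {
--     'nl': {
--         'Tender 720': 'Tender 720',
--         'Tender 570': 'Tender 570',
--         'Electrosloep 10': 'Electrosloep 10',
--         'Electrosloep 8': 'Electrosloep 8',
--         'Zeilboot': 'Zeilboot',
--         'Kano': 'Kano',
--         'Kajak': 'Kajak',
--         'Sup Board': 'Sup Board'
--     },
--     'de': {
--         'Tender 720': 'Tender 720',
--         'Tender 570': 'Tender 570',
--         'Electrosloep 10': 'Electrosloep 10',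
--         'Electrosloep 8': 'Electrosloep 8',
--         'Zeilboot': 'Segelboot',
--         'Kano': 'Kanu',
--         'Kajak': 'Kajak',
--         'Sup Board': 'SUP-Board'
--     },
--     'en': {
--         'Tender 720': 'Tender 720',
--         'Tender 570': 'Tender 570',
--         'Electrosloep 10': 'Electrosloep 10',
--         'Electrosloep 8': 'Electrosloep 8',
--         'Zeilboot': 'Sailboat',
--         'Kano': 'Canoe',
--         'Kajak': 'Kayak',
--         'Sup Board': 'SUP Board'
--     }
-- }
--
-- def translate_boat_names(text: str, target_language: str) -> str:
--     """Translate boat model names in the given text"""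
--     if target_language not in BOAT_TRANSLATIONS:
--         return text
--
--     translations = BOAT_TRANSLATIONS[target_language]
--     translated_text = text
--
--     for dutch_name, translated_name in translations.items():
--         translated_text = translated_text.replace(dutch_name, translated_name)
--
--     return translated_text
-- ===== SOURCE B (Python) =====
-- # Only the entries that actually change the text; the rest are identity no-ops in A.
-- _DIFF_TRANSLATIONS = {
--     'nl': [],
--     'de': [('Zeilboot', 'Segelboot'), ('Kano', 'Kanu'), ('Sup Board', 'SUP-Board')],
--     'en': [('Zeilboot', 'Sailboat'), ('Kano', 'Canoe'), ('Kajak', 'Kayak'),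
--            ('Sup Board', 'SUP Board')],
-- }
--
--
-- def translate_boat_names(text: str, target_language: str) -> str:
--     """Translate boat model names: single left-to-right scan with the non-identity pairs."""
--     pairs = _DIFF_TRANSLATIONS.get(target_language)
--     if pairs is None:
--         return text
--     out = []
--     i = 0
--     n = len(text)
--     while i < n:
--         for name, replacement in pairs:
--             if text.startswith(name, i):
--                 out.append(replacement)
--                 i += len(name)
--                 break
--         else:
--             out.append(text[i])
--             i += 1
--     return ''.join(out)
-- ===== Notes on version B (the rewrite author's own statement) =====
-- stated objective: alternative
-- what changed: A runs eight sequential full-text str.replace passes per language (five of which are identity no-ops); B keeps only the non-identity pairs and makes a single left-to-right scan over the text, emitting at each position the replacement of the first pair that matches there (valid because boat names never overlap each other or any replacement).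
import Mathlib
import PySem

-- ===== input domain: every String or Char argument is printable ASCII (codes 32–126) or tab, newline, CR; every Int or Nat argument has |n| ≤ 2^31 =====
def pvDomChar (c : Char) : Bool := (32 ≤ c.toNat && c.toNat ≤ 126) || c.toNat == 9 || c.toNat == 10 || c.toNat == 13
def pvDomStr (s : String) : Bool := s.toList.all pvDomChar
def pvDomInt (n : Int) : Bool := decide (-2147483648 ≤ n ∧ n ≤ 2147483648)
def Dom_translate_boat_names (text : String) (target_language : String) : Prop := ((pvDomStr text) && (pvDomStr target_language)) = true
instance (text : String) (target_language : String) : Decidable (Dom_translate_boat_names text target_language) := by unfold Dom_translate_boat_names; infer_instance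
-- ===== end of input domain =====

-- B drops the five identity entries A's table carries (they are str.replace no-ops) and makes ONE
-- left-to-right scan with the remaining pairs instead of A's eight sequential full-text replaces.

-- ===== PORT A =====
-- the module-level BOAT_TRANSLATIONS constant
def pvDict_nl : PySem.Dict String String := ⟨[("Tender 720", "Tender 720"), ("Tender 570", "Tender 570"),
  ("Electrosloep 10", "Electrosloep 10"), ("Electrosloep 8", "Electrosloep 8"),
  ("Zeilboot", "Zeilboot"), ("Kano", "Kano"), ("Kajak", "Kajak"), ("Sup Board", "Sup Board")]⟩
def pvDict_de : PySem.Dict String String := ⟨[("Tender 720", "Tender 720"), ("Tender 570", "Tender 570"),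
  ("Electrosloep 10", "Electrosloep 10"), ("Electrosloep 8", "Electrosloep 8"),
  ("Zeilboot", "Segelboot"), ("Kano", "Kanu"), ("Kajak", "Kajak"), ("Sup Board", "SUP-Board")]⟩
def pvDict_en : PySem.Dict String String := ⟨[("Tender 720", "Tender 720"), ("Tender 570", "Tender 570"),
  ("Electrosloep 10", "Electrosloep 10"), ("Electrosloep 8", "Electrosloep 8"),
  ("Zeilboot", "Sailboat"), ("Kano", "Canoe"), ("Kajak", "Kayak"), ("Sup Board", "SUP Board")]⟩
def pvBOAT_TRANSLATIONS : PySem.Dict String (PySem.Dict String String) :=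
  ⟨[("nl", pvDict_nl), ("de", pvDict_de), ("en", pvDict_en)]⟩

-- A: guard on the language, then one full-text str.replace pass per dict entry
def translate_boat_names (text : String) (target_language : String) : String :=
  match PySem.Dict.get? pvBOAT_TRANSLATIONS target_language with
  | none => text
  | some translations =>
      translations.items.foldl (fun acc p => PySem.Str.replace acc p.1 p.2) text

-- ===== PORT B =====
-- Source B's module constant _DIFF_TRANSLATIONS: only the pairs that change the text
def pvDIFF_TRANSLATIONS : PySem.Dict String (List (String × String)) :=
  ⟨[("nl", []),
    ("de", [("Zeilboot", "Segelboot"), ("Kano", "Kanu"), ("Sup Board", "SUP-Board")]),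
    ("en", [("Zeilboot", "Sailboat"), ("Kano", "Canoe"), ("Kajak", "Kayak"), ("Sup Board", "SUP Board")])]⟩

-- Source B's while-loop: at each position emit the replacement of the first matching pair (and skip
-- its key), else emit the character; one pass over the text.
def pvScan (ts : List (List Char × List Char)) : List Char → List Char
  | [] => []
  | c :: s =>
    match ts.find? (fun p => p.1.isPrefixOf (c :: s)) with
    | some p => p.2 ++ pvScan ts (s.drop (p.1.length - 1))
    | none => c :: pvScan ts s
termination_by s => s.length
decreasing_by
  · simp only [List.length_drop, List.length_cons]; omega
  · simp

def translate_boat_names_alt (text : String) (target_language : String) : String :=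
  match PySem.Dict.get? pvDIFF_TRANSLATIONS target_language with
  | none => text
  | some pairs =>
      String.ofList (pvScan (pairs.map (fun p => (p.1.toList, p.2.toList))) text.toList)

-- ===== PRECONDITION & SPEC =====
def Spec_translate_boat_names (text : String) (target_language : String) (out : String) : Prop := out = translate_boat_names_alt text target_language
instance (text : String) (target_language : String) (out : String) : Decidable (Spec_translate_boat_names text target_language out) := by unfold Spec_translate_boat_names; infer_instance

-- ===== CLAIM (what is proved, stated in full; the proofs are below) =====
def Claim_equal_translate_boat_names : Prop := ∀ (text : String) (target_language : String), Dom_translate_boat_names text target_language → Spec_translate_boat_names text target_language (translate_boat_names text target_language)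

-- ===== LEMMAS AND PROOFS =====

-- direct scan form of PySem.Chars.replace for a nonempty pattern
def myRepl (k r : List Char) : List Char → List Char
  | [] => []
  | c :: s =>
    if k.isPrefixOf (c :: s) then r ++ myRepl k r (s.drop (k.length - 1))
    else c :: myRepl k r s
termination_by s => s.length
decreasing_by
  · simp only [List.length_drop, List.length_cons]; omega
  · simp

theorem go_eq (k r : List Char) (hk : k ≠ []) :
    ∀ (fuel : Nat) (s acc : List Char), s.length ≤ fuel →
      PySem.Chars.replace.go k r fuel s acc = acc.reverse ++ myRepl k r s := by
  intro fuel
  induction fuel with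
  | zero =>
    intro s acc h
    have : s = [] := by cases s <;> simp_all
    subst this
    simp [PySem.Chars.replace.go, myRepl]
  | succ n ih =>
    intro s acc h
    cases s with
    | nil => simp [PySem.Chars.replace.go, myRepl]
    | cons c t =>
      rw [PySem.Chars.replace.go]
      by_cases hp : k.isPrefixOf (c :: t) = true
      · rw [if_pos hp]
        have hdrop : List.drop k.length (c :: t) = t.drop (k.length - 1) := by
          cases k with
          | nil => simp_all
          | cons a b => simp
        rw [hdrop, ih _ _ (by have h2 : t.length + 1 ≤ n + 1 := (by simpa using h); rw [List.length_drop]; omega)]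
        rw [myRepl, if_pos hp]
        simp
      · rw [if_neg hp, ih t (c :: acc) (by simpa using Nat.le_of_succ_le_succ h)]
        rw [myRepl, if_neg hp]
        simp

theorem chars_replace_eq (k r s : List Char) (hk : k ≠ []) :
    PySem.Chars.replace s k r = myRepl k r s := by
  rw [PySem.Chars.replace, if_neg (by simp [hk]), go_eq k r hk s.length s [] le_rfl]
  simp

theorem repl_nil (k r : List Char) : myRepl k r [] = [] := by rw [myRepl]

theorem repl_cons_neg {k : List Char} {c : Char} {s : List Char} (r : List Char)
    (h : ¬ k <+: (c :: s)) : myRepl k r (c :: s) = c :: myRepl k r s := by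
  rw [myRepl, if_neg (by simpa [List.isPrefixOf_iff_prefix] using h)]

theorem repl_append_self (kh : Char) (kt r s : List Char) :
    myRepl (kh :: kt) r ((kh :: kt) ++ s) = r ++ myRepl (kh :: kt) r s := by
  rw [show ((kh :: kt) ++ s) = kh :: (kt ++ s) by simp, myRepl,
    if_pos (List.isPrefixOf_iff_prefix.mpr ⟨s, by simp⟩)]
  simp only [List.length_cons, Nat.add_sub_cancel, List.drop_left]

-- replacing a key by itself is a no-op
theorem repl_id_aux (kh : Char) (kt : List Char) :
    ∀ (n : Nat) (s : List Char), s.length ≤ n → myRepl (kh :: kt) (kh :: kt) s = s := by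
  intro n
  induction n with
  | zero =>
    intro s hs
    have : s = [] := by cases s <;> simp_all
    subst this; exact repl_nil _ _
  | succ n ih =>
    intro s hs
    cases s with
    | nil => exact repl_nil _ _
    | cons c s' =>
      by_cases hp : (kh :: kt) <+: (c :: s')
      · obtain ⟨rest, hrest⟩ := hp
        have hs' : s' = kt ++ rest := by simpa using congrArg List.tail hrest.symm
        rw [← hrest, repl_append_self]
        have : rest.length ≤ n := by
          have := hs; rw [← hrest] at this; simp at this; omega
        rw [show myRepl (kh :: kt) (kh :: kt) rest = rest from ih rest this]
      · rw [repl_cons_neg _ hp, ih s' (by simpa using Nat.le_of_succ_le_succ hs)]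

theorem repl_id (k : List Char) (hk : k ≠ []) (s : List Char) : myRepl k k s = s := by
  cases k with
  | nil => exact absurd rfl hk
  | cons kh kt => exact repl_id_aux kh kt s.length s le_rfl

-- the identity entries of A's tables, as rewrite rules
theorem id_T720 : ∀ s, myRepl "Tender 720".toList "Tender 720".toList s = s := repl_id _ (by decide)
theorem id_T570 : ∀ s, myRepl "Tender 570".toList "Tender 570".toList s = s := repl_id _ (by decide)
theorem id_E10 : ∀ s, myRepl "Electrosloep 10".toList "Electrosloep 10".toList s = s := repl_id _ (by decide)
theorem id_E8 : ∀ s, myRepl "Electrosloep 8".toList "Electrosloep 8".toList s = s := repl_id _ (by decide)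
theorem id_Zeil : ∀ s, myRepl "Zeilboot".toList "Zeilboot".toList s = s := repl_id _ (by decide)
theorem id_Kano : ∀ s, myRepl "Kano".toList "Kano".toList s = s := repl_id _ (by decide)
theorem id_Kajak : ∀ s, myRepl "Kajak".toList "Kajak".toList s = s := repl_id _ (by decide)
theorem id_Sup : ∀ s, myRepl "Sup Board".toList "Sup Board".toList s = s := repl_id _ (by decide)

-- the trigger characters: heads of all names and of all replacements; no name contains one
-- anywhere but at its head, no replacement anywhere but at its head
def pvTrig : List Char := ['T', 'E', 'Z', 'K', 'S', 'C']

def pvShapeOK : List Char × List Char → Bool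
  | (kh :: kt, rh :: rt) =>
      pvTrig.contains kh && kt.all (fun c => !pvTrig.contains c) &&
      pvTrig.contains rh && rt.all (fun c => !pvTrig.contains c)
  | _ => false

def pvRelOK (p q : List Char × List Char) : Bool :=
  !(q.1.isPrefixOf p.2) && !(p.2.isPrefixOf q.1) && !(q.1.isPrefixOf p.1) && !(p.1.isPrefixOf q.1)

def pvGood : List (List Char × List Char) → Bool
  | [] => true
  | p :: rest => pvShapeOK p && rest.all (pvRelOK p) && pvGood rest

theorem nontrig_skip (kh : Char) (kt rep : List Char) (hkh : kh ∈ pvTrig) :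
    ∀ (u y : List Char), (∀ c ∈ u, c ∉ pvTrig) →
      myRepl (kh :: kt) rep (u ++ y) = u ++ myRepl (kh :: kt) rep y := by
  intro u
  induction u with
  | nil => intro y _; simp
  | cons a u' ih =>
    intro y hu
    have hne : ¬ (kh :: kt) <+: (a :: (u' ++ y)) := by
      intro hpre
      rcases (List.cons_prefix_cons.mp hpre) with ⟨h1, _⟩
      exact (hu a (by simp)) (h1 ▸ hkh)
    rw [List.cons_append, repl_cons_neg rep hne, ih y (fun c hc => hu c (by simp [hc]))]
    simp

-- k never matches inside (or spanning out of) the block w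
theorem repl_skipBlock (kh : Char) (kt rep : List Char) (hkh : kh ∈ pvTrig)
    (wh : Char) (wt : List Char) (hwt : ∀ c ∈ wt, c ∉ pvTrig)
    (h1 : ¬ (kh :: kt) <+: (wh :: wt)) (h2 : ¬ (wh :: wt) <+: (kh :: kt)) :
    ∀ y, myRepl (kh :: kt) rep ((wh :: wt) ++ y) = (wh :: wt) ++ myRepl (kh :: kt) rep y := by
  intro y
  have hne : ¬ (kh :: kt) <+: wh :: (wt ++ y) := by
    intro hpre
    rcases List.prefix_or_prefix_of_prefix (by simpa using hpre : (kh :: kt) <+: (wh :: wt) ++ y)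
      (List.prefix_append _ y) with h | h
    · exact h1 h
    · exact h2 h
  rw [List.cons_append, repl_cons_neg rep hne, nontrig_skip kh kt rep hkh wt y hwt]
  simp

theorem pres' (kh : Char) (kt : List Char) (rh : Char) (rt : List Char)
    (hrh : rh ∈ pvTrig) :
    ∀ (s w : List Char), (∀ c ∈ w, c ∉ pvTrig) → ¬ w <+: s →
      ¬ w <+: myRepl (kh :: kt) (rh :: rt) s := by
  intro s
  induction s with
  | nil =>
    intro w hw hns
    rw [repl_nil]
    intro hpre
    exact hns (by simpa using hpre)
  | cons c s' ih =>
    intro w hw hns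
    by_cases hp : (kh :: kt) <+: (c :: s')
    · rw [myRepl, if_pos (List.isPrefixOf_iff_prefix.mpr hp)]
      cases w with
      | nil => exact absurd (List.nil_prefix) hns
      | cons a w' =>
        intro hpre
        rcases List.cons_prefix_cons.mp (by simpa using hpre) with ⟨h1, _⟩
        exact (hw a (by simp)) (h1 ▸ hrh)
    · rw [repl_cons_neg _ hp]
      cases w with
      | nil => exact absurd (List.nil_prefix) hns
      | cons a w' =>
        intro hpre
        rcases List.cons_prefix_cons.mp hpre with ⟨h1, h2⟩
        subst h1
        have : ¬ w' <+: s' := fun hx => hns (List.cons_prefix_cons.mpr ⟨rfl, hx⟩)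
        exact ih w' (fun c hc => hw c (by simp [hc])) this h2

-- a later key that does not match at the front keeps not matching after an earlier replace pass
theorem pres (kh : Char) (kt : List Char) (rh : Char) (rt : List Char)
    (hrh : rh ∈ pvTrig)
    (k2h : Char) (k2t : List Char) (hk2t : ∀ c ∈ k2t, c ∉ pvTrig)
    (h1 : ¬ (k2h :: k2t) <+: (rh :: rt)) (h2 : ¬ (rh :: rt) <+: (k2h :: k2t)) :
    ∀ s, ¬ (k2h :: k2t) <+: s → ¬ (k2h :: k2t) <+: myRepl (kh :: kt) (rh :: rt) s := by
  intro s hns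
  cases s with
  | nil => rw [repl_nil]; simp
  | cons c s' =>
    by_cases hp : (kh :: kt) <+: (c :: s')
    · rw [myRepl, if_pos (List.isPrefixOf_iff_prefix.mpr hp)]
      intro hpre
      rcases List.prefix_or_prefix_of_prefix hpre (List.prefix_append _ _) with h | h
      · exact h1 h
      · exact h2 h
    · rw [repl_cons_neg _ hp]
      intro hpre
      rcases List.cons_prefix_cons.mp hpre with ⟨he, h2'⟩
      subst he
      have : ¬ k2t <+: s' := fun hx => hns (List.cons_prefix_cons.mpr ⟨rfl, hx⟩)
      exact pres' kh kt rh rt hrh s' k2t hk2t this h2'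

def seqT (ts : List (List Char × List Char)) (s : List Char) : List Char :=
  ts.foldl (fun acc p => myRepl p.1 p.2 acc) s

theorem shape_elim {p : List Char × List Char} (h : pvShapeOK p = true) :
    ∃ kh kt rh rt, p.1 = kh :: kt ∧ p.2 = rh :: rt ∧ kh ∈ pvTrig ∧ (∀ c ∈ kt, c ∉ pvTrig) ∧
      rh ∈ pvTrig ∧ (∀ c ∈ rt, c ∉ pvTrig) := by
  obtain ⟨k, r⟩ := p
  cases k with
  | nil => simp [pvShapeOK] at h
  | cons kh kt =>
    cases r with
    | nil => simp [pvShapeOK] at h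
    | cons rh rt =>
      simp only [pvShapeOK, Bool.and_eq_true, List.all_eq_true, Bool.not_eq_true',
        List.contains_eq_mem, decide_eq_true_eq, decide_eq_false_iff_not] at h
      exact ⟨kh, kt, rh, rt, rfl, rfl, h.1.1.1, h.1.1.2, h.1.2, h.2⟩

theorem rel_elim {p q : List Char × List Char} (h : pvRelOK p q = true) :
    ¬ q.1 <+: p.2 ∧ ¬ p.2 <+: q.1 ∧ ¬ q.1 <+: p.1 ∧ ¬ p.1 <+: q.1 := by
  simp only [pvRelOK, Bool.and_eq_true, Bool.not_eq_true'] at h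
  obtain ⟨⟨⟨a, b⟩, c⟩, d⟩ := h
  exact ⟨fun hp => by simp [List.isPrefixOf_iff_prefix.mpr hp] at a,
    fun hp => by simp [List.isPrefixOf_iff_prefix.mpr hp] at b,
    fun hp => by simp [List.isPrefixOf_iff_prefix.mpr hp] at c,
    fun hp => by simp [List.isPrefixOf_iff_prefix.mpr hp] at d⟩

theorem good_mem_shape {ts : List (List Char × List Char)} (hg : pvGood ts = true) :
    ∀ p ∈ ts, pvShapeOK p = true := by
  induction ts with
  | nil => simp
  | cons p rest ih =>
    simp only [pvGood, Bool.and_eq_true] at hg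
    intro q hq
    rcases List.mem_cons.mp hq with h | h
    · exact h ▸ hg.1.1
    · exact ih hg.2 q h

theorem seq_nil {ts : List (List Char × List Char)} : seqT ts [] = [] := by
  induction ts with
  | nil => rfl
  | cons p rest ih => simpa [seqT, repl_nil] using ih

theorem seq_cons {ts : List (List Char × List Char)} (hg : pvGood ts = true) :
    ∀ (c : Char) (s : List Char), (∀ p ∈ ts, ¬ p.1 <+: (c :: s)) →
      seqT ts (c :: s) = c :: seqT ts s := by
  induction ts with
  | nil => intro c s _; rfl
  | cons p rest ih =>
    intro c s hnk
    simp only [pvGood, Bool.and_eq_true, List.all_eq_true] at hg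
    obtain ⟨⟨hshape, hrel⟩, hgrest⟩ := hg
    obtain ⟨kh, kt, rh, rt, hk, hr, hkh, _, hrh, _⟩ := shape_elim hshape
    have h0 : ¬ p.1 <+: (c :: s) := hnk p (by simp)
    have hstep : myRepl p.1 p.2 (c :: s) = c :: myRepl p.1 p.2 s := repl_cons_neg _ h0
    show seqT rest (myRepl p.1 p.2 (c :: s)) = c :: seqT rest (myRepl p.1 p.2 s)
    rw [hstep]
    apply ih hgrest
    intro q hq
    obtain ⟨k2h, k2t, _, _, hq1, _, _, hq2t, _, _⟩ := shape_elim (good_mem_shape hgrest q hq)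
    obtain ⟨hA, hB, _, _⟩ := rel_elim (hrel q hq)
    rw [hq1, hr] at hA hB
    have hno : ¬ q.1 <+: (c :: s) := hnk q (List.mem_cons_of_mem _ hq)
    rw [hq1] at hno
    rw [hq1, ← hstep, hk, hr]
    exact pres kh kt rh rt hrh k2h k2t hq2t hA hB (c :: s) hno

theorem seq_prot {rest : List (List Char × List Char)} (hg : pvGood rest = true)
    (p : List Char × List Char) (hrel : ∀ q ∈ rest, pvRelOK p q = true)
    (hshape : pvShapeOK p = true) :
    ∀ y, seqT rest (p.2 ++ y) = p.2 ++ seqT rest y := by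
  induction rest with
  | nil => intro y; rfl
  | cons q rest' ih =>
    intro y
    simp only [pvGood, Bool.and_eq_true] at hg
    obtain ⟨kh, kt, rh, rt, hk, hr, hkh, _, hrh, hrt⟩ := shape_elim hshape
    obtain ⟨k2h, k2t, _, _, hq1, _, hq2h, _, _, _⟩ := shape_elim hg.1.1
    obtain ⟨hA, hB, _, _⟩ := rel_elim (hrel q (by simp))
    have hstep : myRepl q.1 q.2 (p.2 ++ y) = p.2 ++ myRepl q.1 q.2 y := by
      rw [hq1, hr]
      exact repl_skipBlock k2h k2t q.2 hq2h rh rt hrt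
        (by rw [← hq1, ← hr]; exact hA) (by rw [← hq1, ← hr]; exact hB) y
    show seqT rest' (myRepl q.1 q.2 (p.2 ++ y)) = p.2 ++ seqT rest' (myRepl q.1 q.2 y)
    rw [hstep]
    exact ih hg.2 (fun q' hq' => hrel q' (List.mem_cons_of_mem _ hq')) _

theorem seq_match {ts : List (List Char × List Char)} (hg : pvGood ts = true)
    {pq : List Char × List Char} (hmem : pq ∈ ts) :
    ∀ s, seqT ts (pq.1 ++ s) = pq.2 ++ seqT ts s := by
  induction ts with
  | nil => cases hmem
  | cons p rest ih =>
    intro s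
    simp only [pvGood, Bool.and_eq_true, List.all_eq_true] at hg
    obtain ⟨⟨hshape, hrel⟩, hgrest⟩ := hg
    rcases List.mem_cons.mp hmem with heq | hmemr
    · subst heq
      obtain ⟨kh, kt, rh, rt, hk, hr, _, _, _, _⟩ := shape_elim hshape
      have hstep : myRepl pq.1 pq.2 (pq.1 ++ s) = pq.2 ++ myRepl pq.1 pq.2 s := by
        rw [hk]; exact repl_append_self kh kt pq.2 s
      show seqT rest (myRepl pq.1 pq.2 (pq.1 ++ s)) = pq.2 ++ seqT rest (myRepl pq.1 pq.2 s)
      rw [hstep]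
      exact seq_prot hgrest pq hrel hshape _
    · obtain ⟨kh, kt, rh, rt, hk, hr, hkh, _, _, _⟩ := shape_elim hshape
      obtain ⟨k2h, k2t, _, _, hq1, _, _, hq2t, _, _⟩ := shape_elim (good_mem_shape hgrest pq hmemr)
      obtain ⟨_, _, hC, hD⟩ := rel_elim (hrel pq hmemr)
      have hstep : myRepl p.1 p.2 (pq.1 ++ s) = pq.1 ++ myRepl p.1 p.2 s := by
        rw [hq1, hk]
        exact repl_skipBlock kh kt p.2 hkh k2h k2t hq2t
          (by rw [← hq1, ← hk]; exact hD) (by rw [← hq1, ← hk]; exact hC) s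
      show seqT rest (myRepl p.1 p.2 (pq.1 ++ s)) = pq.2 ++ seqT rest (myRepl p.1 p.2 s)
      rw [hstep]
      exact ih hgrest hmemr _

theorem scan_eq_seq {ts : List (List Char × List Char)} (hg : pvGood ts = true) :
    ∀ (n : Nat) (s : List Char), s.length ≤ n → pvScan ts s = seqT ts s := by
  intro n
  induction n with
  | zero =>
    intro s hs
    have : s = [] := by cases s <;> simp_all
    subst this
    rw [seq_nil, pvScan]
  | succ n ih =>
    intro s hs
    cases s with
    | nil => rw [seq_nil, pvScan]
    | cons c s' =>
      cases hf : ts.find? (fun p => p.1.isPrefixOf (c :: s')) with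
      | none =>
        rw [pvScan, hf]
        have hno : ∀ p ∈ ts, ¬ p.1 <+: (c :: s') := by
          intro p hp hpre
          have := List.find?_eq_none.mp hf p hp
          simp [List.isPrefixOf_iff_prefix] at this
          exact this hpre
        rw [seq_cons hg c s' hno, ih s' (by simpa using Nat.le_of_succ_le_succ hs)]
      | some q =>
        have hmem := List.mem_of_find?_eq_some hf
        have hq0 := List.find?_some hf
        have hqpre : q.1 <+: (c :: s') := List.isPrefixOf_iff_prefix.mp (by simpa using hq0)
        obtain ⟨kh, kt, _, _, hq1, _, _, _, _, _⟩ := shape_elim (good_mem_shape hg q hmem)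
        obtain ⟨rest0, hrest0⟩ := hqpre
        have hs' : s' = kt ++ rest0 := by
          rw [hq1] at hrest0
          simpa using congrArg List.tail hrest0.symm
        have hdrop : s'.drop (q.1.length - 1) = rest0 := by
          rw [hs', hq1]
          simp only [List.length_cons, Nat.add_sub_cancel, List.drop_left]
        rw [pvScan, hf]
        show q.2 ++ pvScan ts (List.drop (q.1.length - 1) s') = seqT ts (c :: s')
        rw [hdrop]
        have htext : (c :: s') = q.1 ++ rest0 := hrest0.symm
        rw [htext, seq_match hg hmem rest0]
        congr 1
        apply ih
        have : (c :: s').length ≤ n + 1 := hs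
        rw [htext, hq1] at this
        simp only [List.length_append, List.length_cons] at this
        omega

theorem fold_bridge :
    ∀ (items : List (String × String)) (t : String), (∀ p ∈ items, p.1 ≠ "") →
      (items.foldl (fun acc p => PySem.Str.replace acc p.1 p.2) t).toList =
        seqT (items.map (fun p => (p.1.toList, p.2.toList))) t.toList := by
  intro items
  induction items with
  | nil => intro t _; rfl
  | cons p rest ih =>
    intro t hne
    have hk : p.1.toList ≠ [] := by
      intro h
      exact (hne p (by simp)) (String.toList_inj.mp (by simpa using h))
    show (rest.foldl _ (PySem.Str.replace t p.1 p.2)).toList = seqT _ (myRepl p.1.toList p.2.toList t.toList)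
    rw [← chars_replace_eq _ _ _ hk, ← PySem.Str.toList_replace]
    exact ih _ (fun q hq => hne q (List.mem_cons_of_mem _ hq))

-- the common per-language step: A's full foldl = B's scan with the reduced pairs
theorem lang_eq (text : String) (d : PySem.Dict String String)
    (red : List (List Char × List Char))
    (hne : ∀ p ∈ d.items, p.1 ≠ "")
    (hgood : pvGood red = true)
    (hseq : ∀ s, seqT (d.items.map (fun p => (p.1.toList, p.2.toList))) s = seqT red s) :
    d.items.foldl (fun acc p => PySem.Str.replace acc p.1 p.2) text
      = String.ofList (pvScan red text.toList) := by
  apply String.toList_inj.mp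
  rw [fold_bridge d.items text hne, String.toList_ofList,
    scan_eq_seq hgood text.toList.length text.toList le_rfl, hseq]

theorem translate_boat_names_spec : Claim_equal_translate_boat_names := by
  intro text lang _
  unfold Spec_translate_boat_names translate_boat_names translate_boat_names_alt
  by_cases h1 : lang = "nl"
  · subst h1
    show (pvDict_nl.items.foldl _ text) = String.ofList (pvScan _ text.toList)
    exact lang_eq text pvDict_nl _ (by decide) (by decide) (by
      intro s
      simp only [pvDict_nl, List.map, seqT, List.foldl]
      rw [id_Sup, id_Kajak, id_Kano, id_Zeil, id_E8, id_E10, id_T570, id_T720])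
  by_cases h2 : lang = "de"
  · subst h2
    show (pvDict_de.items.foldl _ text) = String.ofList (pvScan _ text.toList)
    exact lang_eq text pvDict_de _ (by decide) (by decide) (by
      intro s
      simp only [pvDict_de, List.map, seqT, List.foldl]
      rw [id_Kajak, id_E8, id_E10, id_T570, id_T720])
  by_cases h3 : lang = "en"
  · subst h3
    show (pvDict_en.items.foldl _ text) = String.ofList (pvScan _ text.toList)
    exact lang_eq text pvDict_en _ (by decide) (by decide) (by
      intro s
      simp only [pvDict_en, List.map, seqT, List.foldl]
      rw [id_E8, id_E10, id_T570, id_T720])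
  · have e1 : (("nl" : String) == lang) = false := beq_eq_false_iff_ne.mpr (fun h => h1 h.symm)
    have e2 : (("de" : String) == lang) = false := beq_eq_false_iff_ne.mpr (fun h => h2 h.symm)
    have e3 : (("en" : String) == lang) = false := beq_eq_false_iff_ne.mpr (fun h => h3 h.symm)
    have hA : PySem.Dict.get? pvBOAT_TRANSLATIONS lang = none := by
      simp [pvBOAT_TRANSLATIONS, PySem.Dict.get?, List.find?, e1, e2, e3]
    have hB : PySem.Dict.get? pvDIFF_TRANSLATIONS lang = none := by
      simp [pvDIFF_TRANSLATIONS, PySem.Dict.get?, List.find?, e1, e2, e3]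
    rw [hA, hB]
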